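-- pv_equiv track=rewrite | github.com/anatoliysafonov/pythone_core | Домашні завдання/Module 6.py | find_type_of_file
-- ===== SOURCE A (Python) =====
-- LIST_OF_FOLDERS = {'pictures':     ['JPEG', 'PNG', 'JPG', 'SVG'],
--                    'video':        ['AVI', 'MP4', 'MOV', 'MKV'],
--                    'documents':    ['DOC', 'DOCX', 'TXT', 'PDF', 'XLSX', 'PPTX'],
--                    'audio':        ['MP3', 'OGG', 'WAV', 'AMR'],
--                    'archives':     ['ZIP', 'GZ', 'TAR'],
--                    'others':       []
--                    }
--
-- def find_type_of_file(extention: str) -> str: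
--     extention = extention[1:]
--     founded: str = None
--     for type_of_file in LIST_OF_FOLDERS:
--         if extention.upper() in LIST_OF_FOLDERS[type_of_file]:
--             founded = str(type_of_file)
--     if not founded:
--         founded = 'others'
--     return founded
-- ===== SOURCE B (Python) =====
-- LIST_OF_FOLDERS = {'pictures':     ['JPEG', 'PNG', 'JPG', 'SVG'],
--                    'video':        ['AVI', 'MP4', 'MOV', 'MKV'],
--                    'documents':    ['DOC', 'DOCX', 'TXT', 'PDF', 'XLSX', 'PPTX'],
--                    'audio':        ['MP3', 'OGG', 'WAV', 'AMR'],
--                    'archives':     ['ZIP', 'GZ', 'TAR'],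
--                    'others':       []
--                    }
--
-- # Flat (extension, folder) pair list built once from the table.
-- PAIRS = [(ext, folder) for folder, exts in LIST_OF_FOLDERS.items() for ext in exts]
--
-- def find_type_of_file(extention: str) -> str:
--     key = extention[1:].upper()
--     for ext, folder in PAIRS:
--         if ext == key:
--             return folder
--     return 'others'
-- ===== Notes on version B (the rewrite author's own statement) =====
-- stated objective: simpler
-- what changed: Flattens the folder table once into a list of (extension, folder) pairs and returns on the first matching pair, instead of A's last-match scan over every folder with an inner membership test in each folder's list; correct because the folder lists are disjoint.
import Mathlib
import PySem

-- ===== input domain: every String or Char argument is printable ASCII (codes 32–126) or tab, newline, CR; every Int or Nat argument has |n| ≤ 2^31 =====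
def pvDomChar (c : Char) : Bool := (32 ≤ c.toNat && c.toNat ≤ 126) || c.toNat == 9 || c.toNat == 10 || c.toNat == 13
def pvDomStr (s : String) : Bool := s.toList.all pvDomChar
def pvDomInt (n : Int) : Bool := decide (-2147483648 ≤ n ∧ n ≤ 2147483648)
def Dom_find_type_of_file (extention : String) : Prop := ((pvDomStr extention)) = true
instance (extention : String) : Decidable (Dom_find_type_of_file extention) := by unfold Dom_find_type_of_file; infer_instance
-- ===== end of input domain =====

-- B flattens the folder table into (extension, folder) pairs and returns on the first match,
-- instead of A's last-match scan of every folder; equal because the folder lists are disjoint.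

-- ===== PORT A =====
-- LIST_OF_FOLDERS: a dict iterated in insertion order (keys paired with their extension lists).
def pvListOfFolders : List (String × List (List Char)) :=
  [("pictures",  ["JPEG".toList, "PNG".toList, "JPG".toList, "SVG".toList]),
   ("video",     ["AVI".toList, "MP4".toList, "MOV".toList, "MKV".toList]),
   ("documents", ["DOC".toList, "DOCX".toList, "TXT".toList, "PDF".toList, "XLSX".toList, "PPTX".toList]),
   ("audio",     ["MP3".toList, "OGG".toList, "WAV".toList, "AMR".toList]),
   ("archives",  ["ZIP".toList, "GZ".toList, "TAR".toList]),
   ("others",    [])]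

def find_type_of_file (extention : String) : String :=
  -- extention = extention[1:]
  let ext : List Char := PySem.List.slice extention.toList (some 1) none
  -- founded = None; for type_of_file in LIST_OF_FOLDERS: if extention.upper() in …: founded = type_of_file
  let founded : Option String :=
    pvListOfFolders.foldl
      (fun acc p => if PySem.Chars.upper ext ∈ p.2 then some p.1 else acc) none
  -- if not founded: founded = 'others'  ('not' is Python truthiness: None or the empty string)
  match founded with
  | none => "others"
  | some f => if f = "" then "others" else f

-- ===== PORT B =====
-- PAIRS = [(ext, folder) for folder, exts in LIST_OF_FOLDERS.items() for ext in exts], written flat.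
def pvPairs : List (List Char × String) :=
  [("JPEG".toList, "pictures"), ("PNG".toList, "pictures"), ("JPG".toList, "pictures"), ("SVG".toList, "pictures"),
   ("AVI".toList, "video"), ("MP4".toList, "video"), ("MOV".toList, "video"), ("MKV".toList, "video"),
   ("DOC".toList, "documents"), ("DOCX".toList, "documents"), ("TXT".toList, "documents"),
   ("PDF".toList, "documents"), ("XLSX".toList, "documents"), ("PPTX".toList, "documents"),
   ("MP3".toList, "audio"), ("OGG".toList, "audio"), ("WAV".toList, "audio"), ("AMR".toList, "audio"),
   ("ZIP".toList, "archives"), ("GZ".toList, "archives"), ("TAR".toList, "archives")]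

-- the for-loop with early return: first match wins, 'others' if none matches
def pvFirstMatch (k : List Char) : List (List Char × String) → String
  | [] => "others"
  | (e, f) :: rest => if e = k then f else pvFirstMatch k rest

def find_type_of_file_alt (extention : String) : String :=
  pvFirstMatch (PySem.Chars.upper (PySem.List.slice extention.toList (some 1) none)) pvPairs

-- ===== PRECONDITION & SPEC =====
def Spec_find_type_of_file (extention : String) (out : String) : Prop := out = find_type_of_file_alt extention
instance (extention : String) (out : String) : Decidable (Spec_find_type_of_file extention out) := by unfold Spec_find_type_of_file; infer_instance

-- ===== CLAIM (what is proved, stated in full; the proofs are below) =====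
def Claim_equal_find_type_of_file : Prop := ∀ (extention : String), Dom_find_type_of_file extention → Spec_find_type_of_file extention (find_type_of_file extention)

-- ===== LEMMAS AND PROOFS =====

-- Core fact: for ANY candidate key u, A's last-match scan of the (disjoint) folder table
-- agrees with B's first-match search of the flat pair list.
theorem pv_core_eq (u : List Char) :
    (match pvListOfFolders.foldl
        (fun acc p => if u ∈ p.2 then some p.1 else acc) (none : Option String) with
     | none => "others"
     | some f => if f = "" then "others" else f)
    = pvFirstMatch u pvPairs := by
  by_cases h1 : u = (['J', 'P', 'E', 'G'] : List Char); · subst h1; decide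
  by_cases h2 : u = (['P', 'N', 'G'] : List Char); · subst h2; decide
  by_cases h3 : u = (['J', 'P', 'G'] : List Char); · subst h3; decide
  by_cases h4 : u = (['S', 'V', 'G'] : List Char); · subst h4; decide
  by_cases h5 : u = (['A', 'V', 'I'] : List Char); · subst h5; decide
  by_cases h6 : u = (['M', 'P', '4'] : List Char); · subst h6; decide
  by_cases h7 : u = (['M', 'O', 'V'] : List Char); · subst h7; decide
  by_cases h8 : u = (['M', 'K', 'V'] : List Char); · subst h8; decide
  by_cases h9 : u = (['D', 'O', 'C'] : List Char); · subst h9; decide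
  by_cases h10 : u = (['D', 'O', 'C', 'X'] : List Char); · subst h10; decide
  by_cases h11 : u = (['T', 'X', 'T'] : List Char); · subst h11; decide
  by_cases h12 : u = (['P', 'D', 'F'] : List Char); · subst h12; decide
  by_cases h13 : u = (['X', 'L', 'S', 'X'] : List Char); · subst h13; decide
  by_cases h14 : u = (['P', 'P', 'T', 'X'] : List Char); · subst h14; decide
  by_cases h15 : u = (['M', 'P', '3'] : List Char); · subst h15; decide
  by_cases h16 : u = (['O', 'G', 'G'] : List Char); · subst h16; decide
  by_cases h17 : u = (['W', 'A', 'V'] : List Char); · subst h17; decide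
  by_cases h18 : u = (['A', 'M', 'R'] : List Char); · subst h18; decide
  by_cases h19 : u = (['Z', 'I', 'P'] : List Char); · subst h19; decide
  by_cases h20 : u = (['G', 'Z'] : List Char); · subst h20; decide
  by_cases h21 : u = (['T', 'A', 'R'] : List Char); · subst h21; decide
  -- u matches no extension: A's fold stays none, B's search falls through to 'others'
  simp [pvListOfFolders, pvPairs, pvFirstMatch,
        h1, h2, h3, h4, h5, h6, h7, h8, h9, h10, h11, h12, h13, h14, h15, h16, h17,
        h18, h19, h20, h21,
        Ne.symm h1, Ne.symm h2, Ne.symm h3, Ne.symm h4, Ne.symm h5, Ne.symm h6,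
        Ne.symm h7, Ne.symm h8, Ne.symm h9, Ne.symm h10, Ne.symm h11, Ne.symm h12,
        Ne.symm h13, Ne.symm h14, Ne.symm h15, Ne.symm h16, Ne.symm h17, Ne.symm h18,
        Ne.symm h19, Ne.symm h20, Ne.symm h21]

-- ===== VERDICT (by name: the statement is the Claim_ definition above) =====
theorem find_type_of_file_spec : Claim_equal_find_type_of_file := by
  intro extention _
  unfold Spec_find_type_of_file find_type_of_file find_type_of_file_alt
  exact pv_core_eq (PySem.Chars.upper (PySem.List.slice extention.toList (some 1) none))
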